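-- pv_equiv track=rewrite | github.com/AigulParamonova/algorithms | Введение в алгоритмы.задачки/sleight_of_hand.py | sleight_of_hand
-- ===== SOURCE A (Python) =====
-- def sleight_of_hand(number, trainer):
--     symbol = []
--     for i in range(4):
--         for j in trainer[i]:
--             if j == '.':
--                 continue
--             symbol.append(int(j))
--     entry = 2 * number
--     score = sum(0 < symbol.count(num) <= entry for num in range(1,10))
--     return score
-- ===== SOURCE B (Python) =====
-- def sleight_of_hand(number, trainer):
--     digits = sorted(int(ch) for row in trainer[:4] for ch in row if ch != '.')
--     entry = 2 * number
--     score = 0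
--     run = 0
--     prev = None
--     for d in digits:
--         if prev is not None and d != prev:
--             if prev >= 1 and run <= entry:
--                 score += 1
--             run = 0
--         run += 1
--         prev = d
--     if prev is not None and prev >= 1 and run <= entry:
--         score += 1
--     return score
-- ===== Notes on version B (the rewrite author's own statement) =====
-- stated objective: alternative
-- what changed: B sorts the extracted digits and counts runs in one linear scan over the sorted list (a run of length in (0, 2*number] with digit >= 1 scores a point), replacing A's nine repeated symbol.count list scans; no per-digit counting or frequency table exists in B.
import Mathlib
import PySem

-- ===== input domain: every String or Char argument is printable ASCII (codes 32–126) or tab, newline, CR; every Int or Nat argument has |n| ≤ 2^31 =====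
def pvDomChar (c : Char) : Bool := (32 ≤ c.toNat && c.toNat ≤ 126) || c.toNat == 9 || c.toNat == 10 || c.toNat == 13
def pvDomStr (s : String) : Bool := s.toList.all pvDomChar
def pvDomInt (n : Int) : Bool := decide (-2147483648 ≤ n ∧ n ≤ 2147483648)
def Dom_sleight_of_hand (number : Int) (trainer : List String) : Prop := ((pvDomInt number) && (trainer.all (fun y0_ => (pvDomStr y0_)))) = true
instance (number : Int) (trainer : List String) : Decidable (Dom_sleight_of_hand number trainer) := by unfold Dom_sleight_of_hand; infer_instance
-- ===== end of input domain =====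

-- B sorts the extracted digits and scores runs in one linear scan (run of length in (0, 2*number] with digit ≥ 1), instead of A's nine repeated symbol.count scans.

-- ===== PORT A =====
-- trainer[i] is ported with default "" and int(j) with default 0; Pre_ guarantees 4 ≤ trainer.length
-- and that every character is '.' or a digit, so the defaults are never used inside Pre_.
def sleight_of_hand (number : Int) (trainer : List String) : Int :=
  let symbol : List Int :=
    (PySem.List.pyRange 0 4 1).foldl (fun acc i =>
      (PySem.List.pyGetD trainer i "").toList.foldl (fun acc j =>
        if j == '.' then acc
        else acc ++ [(PySem.Int.ofStr? (String.singleton j)).getD 0]) acc) []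
  let entry := 2 * number
  (PySem.List.pyRange 1 10 1).foldl (fun score num =>
    score + (if 0 < (symbol.count num : Int) ∧ (symbol.count num : Int) ≤ entry then 1 else 0)) 0

-- ===== PORT B =====
-- B-side helpers: the loop body of Source B's single pass (state = (prev, run, score)) and the final flush.
def pvStep (entry : Int) (st : Option Int × Int × Int) (d : Int) : Option Int × Int × Int :=
  match st with
  | (some p, run, score) =>
    if d ≠ p then (some d, 0 + 1, if p ≥ 1 ∧ run ≤ entry then score + 1 else score)
    else (some d, run + 1, score)
  | (none, run, score) => (some d, run + 1, score)

def pvFin (entry : Int) (st : Option Int × Int × Int) : Int :=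
  match st with
  | (some p, run, score) => if p ≥ 1 ∧ run ≤ entry then score + 1 else score
  | (none, _, score) => score

def sleight_of_hand_alt (number : Int) (trainer : List String) : Int :=
  let digits : List Int :=
    PySem.List.sorted
      ((PySem.List.slice trainer none (some 4)).flatMap (fun row =>
        (row.toList.filter (fun ch => !(ch == '.'))).map
          (fun ch => (PySem.Int.ofStr? (String.singleton ch)).getD 0)))
      (fun x => x) false
  let entry := 2 * number
  pvFin entry (digits.foldl (pvStep entry) (none, 0, 0))

-- ===== PRECONDITION & SPEC =====
-- Pre_: exactly the inputs on which A returns — at least four rows, and the first four rows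
-- contain only '.' and digit characters (otherwise trainer[i] raises IndexError or int(j) raises ValueError).
def Pre_sleight_of_hand (number : Int) (trainer : List String) : Prop :=
  4 ≤ trainer.length ∧
  ((trainer.take 4).all (fun s => s.toList.all
    (fun c => c ∈ ['.', '0', '1', '2', '3', '4', '5', '6', '7', '8', '9'])) = true)
instance (number : Int) (trainer : List String) : Decidable (Pre_sleight_of_hand number trainer) := by
  unfold Pre_sleight_of_hand; infer_instance
def pvWitness_sleight_of_hand : Int × List String := (1, ["12..", "3", "", "991"])

def Spec_sleight_of_hand (number : Int) (trainer : List String) (out : Int) : Prop :=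
  out = sleight_of_hand_alt number trainer
instance (number : Int) (trainer : List String) (out : Int) : Decidable (Spec_sleight_of_hand number trainer out) := by
  unfold Spec_sleight_of_hand; infer_instance

-- ===== CLAIM (what is proved, stated in full; the proofs are below) =====
def Claim_equal_sleight_of_hand : Prop := ∀ (number : Int) (trainer : List String), Dom_sleight_of_hand number trainer → Pre_sleight_of_hand number trainer → Spec_sleight_of_hand number trainer (sleight_of_hand number trainer)

-- ===== LEMMAS AND PROOFS =====

-- the distinct-digit score B and A both compute, written as a countP over the digit range
def pvC (entry : Int) (s : List Int) : Nat :=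
  List.countP (fun a => decide (0 < (s.count a : Int) ∧ (s.count a : Int) ≤ entry))
    [1, 2, 3, 4, 5, 6, 7, 8, 9]

lemma foldl_skip_dot {β : Type} (g : β → Char → β) (l : List Char) (b : β) :
    l.foldl (fun acc c => if c == '.' then acc else g acc c) b
      = (l.filter (fun c => !(c == '.'))).foldl g b := by
  induction l generalizing b with
  | nil => rfl
  | cons c t ih =>
    by_cases h : (c == '.') = true
    · simp only [List.foldl_cons, List.filter_cons, h, if_true, Bool.not_true]
      exact ih b
    · simp only [List.foldl_cons, List.filter_cons, h, Bool.not_false, if_false, if_true,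
        Bool.false_eq_true]
      exact ih (g b c)

-- a run of the current value only lengthens the run counter
lemma pvStep_replicate (entry p run score : Int) (k : Nat) :
    (List.replicate k p).foldl (pvStep entry) (some p, run, score)
      = (some p, run + (k : Int), score) := by
  induction k generalizing run with
  | zero => simp
  | succ m ih =>
    simp only [List.replicate_succ, List.foldl_cons, pvStep]
    rw [if_neg (show ¬ (p ≠ p) by simp), ih]
    simp only [Prod.mk.injEq, true_and, and_true]
    push_cast; ring

-- once the next value differs (or the list ends), flushing prev now or carrying it one step is the same
lemma pvStep_flush (entry p run score : Int) (t : List Int)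
    (h : ∀ x ∈ t.head?, x ≠ p) :
    pvFin entry (t.foldl (pvStep entry) (some p, run, score))
      = pvFin entry (t.foldl (pvStep entry)
          (none, 0, if p ≥ 1 ∧ run ≤ entry then score + 1 else score)) := by
  cases t with
  | nil => simp [pvFin]
  | cons d u =>
    have hd : d ≠ p := h d (by simp)
    simp only [List.foldl_cons, pvStep, if_pos hd]

lemma countP_split (l : List Int) (hnd : l.Nodup) (p : Int) (qs qt : Int → Bool)
    (hne : ∀ a ∈ l, a ≠ p → qs a = qt a) (hqt : qt p = false) :
    l.countP qs = l.countP qt + (if p ∈ l ∧ qs p = true then 1 else 0) := by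
  induction l with
  | nil => simp
  | cons a u ih =>
    have hnd' : u.Nodup := hnd.of_cons
    by_cases hap : a = p
    · subst hap
      have hnotu : a ∉ u := (List.nodup_cons.mp hnd).1
      have hu : u.countP qs = u.countP qt + 0 := by
        rw [ih hnd' (fun b hb hbp => hne b (by simp [hb]) hbp)]
        simp [hnotu]
      simp only [List.countP_cons, hqt, hu]
      by_cases hq : qs a = true <;> simp [hq]
    · have hqa : qs a = qt a := hne a (by simp) hap
      have := ih hnd' (fun b hb hbp => hne b (by simp [hb]) hbp)
      simp only [List.countP_cons, this, hqa, List.mem_cons]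
      have hiff : ((p = a ∨ p ∈ u) ∧ qs p = true) ↔ (p ∈ u ∧ qs p = true) := by
        constructor
        · rintro ⟨rfl | h, hq⟩
          · exact absurd rfl hap
          · exact ⟨h, hq⟩
        · rintro ⟨h, hq⟩
          exact ⟨Or.inr h, hq⟩
      simp only [hiff]
      ring

-- the run scan over a sorted list of digits computes the distinct-digit score
lemma pvMain (entry : Int) : ∀ (n : Nat) (s : List Int), s.length ≤ n →
    s.Pairwise (· ≤ ·) → (∀ x ∈ s, x ≤ 9) → ∀ score : Int,
    pvFin entry (s.foldl (pvStep entry) (none, 0, score)) = score + (pvC entry s : Int) := by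
  intro n
  induction n with
  | zero =>
    intro s hs _ _ score
    have : s = [] := List.eq_nil_of_length_eq_zero (Nat.le_zero.mp hs)
    subst this; simp [pvFin, pvC]
  | succ m ih =>
    intro s hlen hsort hbd score
    cases s with
    | nil => simp [pvFin, pvC]
    | cons p t =>
      set t1 := t.takeWhile (fun x => x == p) with ht1
      set t2 := t.dropWhile (fun x => x == p) with ht2
      have htsplit : t = t1 ++ t2 := (List.takeWhile_append_dropWhile).symm
      have ht1rep : t1 = List.replicate t1.length p := by
        apply List.eq_replicate_of_mem
        intro b hb
        have := List.mem_takeWhile_imp hb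
        simpa using this
      have hple : ∀ x ∈ t, p ≤ x := fun x hx => List.rel_of_pairwise_cons hsort hx
      have ht2sort : t2.Pairwise (· ≤ ·) := by
        have := (List.pairwise_cons.mp hsort).2
        rw [htsplit] at this
        exact (List.pairwise_append.mp this).2.1
      have ht2head : ∀ x ∈ t2.head?, x ≠ p := by
        intro x hx
        have hhd := List.head?_dropWhile_not (fun y => y == p) t
        rw [← ht2] at hhd
        cases h2 : t2 with
        | nil => rw [h2] at hx; simp at hx
        | cons d u =>
          rw [h2] at hx hhd
          simp only [List.head?_cons, Option.mem_some_iff] at hx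
          subst hx
          simpa using hhd
      have hpnott2 : p ∉ t2 := by
        intro hp
        cases h2 : t2 with
        | nil => rw [h2] at hp; simp at hp
        | cons d u =>
          have hdp : d ≠ p := by
            apply ht2head; rw [h2]; simp
          have hd_t : d ∈ t := by
            rw [htsplit, h2]; simp
          have hpd : p ≤ d := hple d hd_t
          have hd_lt : p < d := lt_of_le_of_ne hpd (Ne.symm hdp)
          rw [h2] at hp
          rcases List.mem_cons.mp hp with h | h
          · exact hdp h.symm
          · -- p ∈ u, but d ≤ p would follow from sortedness of t2 = d :: u
            have : d ≤ p := by
              rw [h2] at ht2sort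
              exact List.rel_of_pairwise_cons ht2sort h
            omega
      -- run the fold
      have hfold : (p :: t).foldl (pvStep entry) (none, 0, score)
          = t2.foldl (pvStep entry) (some p, (0:Int) + 1 + (t1.length : Int), score) := by
        rw [htsplit, List.foldl_cons, List.foldl_append]
        have h1 : pvStep entry (none, 0, score) p = (some p, (0:Int) + 1, score) := rfl
        rw [h1]
        have h2' : t1.foldl (pvStep entry) (some p, (0:Int) + 1, score)
            = (some p, (0:Int) + 1 + (t1.length : Int), score) := by
          conv_lhs => rw [ht1rep]
          rw [pvStep_replicate]
        rw [h2']
      -- counts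
      have hcount_p : ((p :: t).count p : Int) = 1 + (t1.length : Int) := by
        have h1 : t1.count p = t1.length := by
          rw [ht1rep]; simp
        have h2c : t2.count p = 0 := List.count_eq_zero.mpr hpnott2
        have hstep : (p :: t).count p = t1.length + 1 := by
          rw [List.count_cons_self, htsplit, List.count_append, h1, h2c]
        rw [hstep]; push_cast; ring
      have hcount_ne : ∀ a : Int, a ≠ p → (p :: t).count a = t2.count a := by
        intro a hap
        rw [htsplit]
        have h1 : t1.count a = 0 := by
          rw [ht1rep]
          exact List.count_eq_zero.mpr (by simp [hap])
        simp [List.count_append, h1, Ne.symm hap]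
      -- the countP step
      have hC : (pvC entry (p :: t) : Int)
          = (pvC entry t2 : Int) + (if p ≥ 1 ∧ (0:Int) + 1 + (t1.length : Int) ≤ entry then 1 else 0) := by
        have hnd : ([1,2,3,4,5,6,7,8,9] : List Int).Nodup := by decide
        have := countP_split [1,2,3,4,5,6,7,8,9] hnd p
          (fun a => decide (0 < ((p :: t).count a : Int) ∧ ((p :: t).count a : Int) ≤ entry))
          (fun a => decide (0 < (t2.count a : Int) ∧ (t2.count a : Int) ≤ entry))
          (fun a _ hap => by simp only [hcount_ne a hap])
          (by simp [List.count_eq_zero.mpr hpnott2])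
        unfold pvC
        rw [this]
        have hmem : (p ∈ ([1,2,3,4,5,6,7,8,9] : List Int)) ↔ (1 ≤ p ∧ p ≤ 9) := by
          constructor
          · intro h; fin_cases h <;> omega
          · intro ⟨h1, h9⟩
            interval_cases p <;> simp
        have hp9 : p ≤ 9 := hbd p (by simp)
        by_cases hcond : p ≥ 1 ∧ (0:Int) + 1 + (t1.length : Int) ≤ entry
        · have : (p ∈ ([1,2,3,4,5,6,7,8,9] : List Int) ∧
              decide (0 < ((p :: t).count p : Int) ∧ ((p :: t).count p : Int) ≤ entry) = true) := by
            refine ⟨hmem.mpr ⟨hcond.1, hp9⟩, ?_⟩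
            rw [decide_eq_true_eq, hcount_p]
            constructor
            · positivity
            · have := hcond.2; omega
          rw [if_pos this, if_pos hcond]
          push_cast; ring
        · have : ¬ (p ∈ ([1,2,3,4,5,6,7,8,9] : List Int) ∧
              decide (0 < ((p :: t).count p : Int) ∧ ((p :: t).count p : Int) ≤ entry) = true) := by
            rintro ⟨hm, hd⟩
            rw [decide_eq_true_eq, hcount_p] at hd
            have h1p := (hmem.mp hm).1
            exact hcond ⟨h1p, hd.2⟩
          rw [if_neg this, if_neg hcond]
          push_cast; ring
      -- put it together
      rw [hfold, pvStep_flush entry p _ score t2 ht2head]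
      have hlen2 : t2.length ≤ m := by
        have h1 : t.length = t1.length + t2.length := by
          rw [htsplit, List.length_append]
        simp only [List.length_cons] at hlen
        omega
      have hbd2 : ∀ x ∈ t2, x ≤ 9 := by
        intro x hx
        exact hbd x (by rw [htsplit] at *; simp [List.mem_append.mpr (Or.inr hx)])
      rw [ih t2 hlen2 ht2sort hbd2]
      rw [hC]
      by_cases hcond : p ≥ 1 ∧ (0:Int) + 1 + (t1.length : Int) ≤ entry
      · rw [if_pos hcond, if_pos hcond]; ring
      · rw [if_neg hcond, if_neg hcond]; ring

-- ===== VERDICT (by name: the statement is the Claim_ definition above) =====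
set_option maxRecDepth 8192 in
theorem sleight_of_hand_spec : Claim_equal_sleight_of_hand := by
  intro number trainer _hdom hpre
  obtain ⟨hlen, hchars⟩ := hpre
  simp only [List.all_eq_true, decide_eq_true_eq] at hchars
  match trainer, hlen, hchars with
  | t0 :: t1 :: t2 :: t3 :: rest, hlen, hchars =>
  unfold Spec_sleight_of_hand sleight_of_hand sleight_of_hand_alt
  have hr4 : PySem.List.pyRange 0 4 1 = [0, 1, 2, 3] := by decide
  have hg0 : PySem.List.pyGetD (t0 :: t1 :: t2 :: t3 :: rest) (0 : Int) "" = t0 := by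
    simp [PySem.List.pyGetD, PySem.List.pyGet?, PySem.List.pyIdx?,
          show ((0:Int) ≤ (rest.length:Int) + 1 + 1 + 1) from by positivity]
  have hg1 : PySem.List.pyGetD (t0 :: t1 :: t2 :: t3 :: rest) (1 : Int) "" = t1 := by
    simp [PySem.List.pyGetD, PySem.List.pyGet?, PySem.List.pyIdx?,
          show ((0:Int) ≤ (rest.length:Int) + 1 + 1) from by positivity]
  have hg2 : PySem.List.pyGetD (t0 :: t1 :: t2 :: t3 :: rest) (2 : Int) "" = t2 := by
    simp [PySem.List.pyGetD, PySem.List.pyGet?, PySem.List.pyIdx?,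
          show ((2:Int) ≤ (rest.length:Int) + 1 + 1 + 1) from by omega]
  have hg3 : PySem.List.pyGetD (t0 :: t1 :: t2 :: t3 :: rest) (3 : Int) "" = t3 := by
    simp [PySem.List.pyGetD, PySem.List.pyGet?, PySem.List.pyIdx?,
          show ((3:Int) ≤ (rest.length:Int) + 1 + 1 + 1) from by omega]
  have hsl : PySem.List.slice (t0 :: t1 :: t2 :: t3 :: rest) none (some 4) = [t0, t1, t2, t3] := by
    rw [PySem.List.slice_to (t0 :: t1 :: t2 :: t3 :: rest) (show (0:Int) ≤ 4 by norm_num)]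
    simp [List.take_succ_cons]
  simp only [hr4, List.foldl_cons, List.foldl_nil, hg0, hg1, hg2, hg3, foldl_skip_dot, hsl]
  simp only [← List.foldl_append]
  rw [PySem.List.foldl_append_singleton_eq_map]
  simp only [List.nil_append, List.flatMap_cons, List.flatMap_nil, List.map_append,
    List.append_nil, List.append_assoc]
  set f : Char → Int := fun ch => (PySem.Int.ofStr? (String.singleton ch)).getD 0 with hf
  set ns : List Int :=
    (List.filter (fun c => !(c == '.')) t0.toList).map f ++
    ((List.filter (fun c => !(c == '.')) t1.toList).map f ++
    ((List.filter (fun c => !(c == '.')) t2.toList).map f ++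
    (List.filter (fun c => !(c == '.')) t3.toList).map f)) with hns
  set s : List Int := PySem.List.sorted ns (fun x => x) false with hs
  -- digit bounds
  have hD : ∀ c ∈ ['.', '0', '1', '2', '3', '4', '5', '6', '7', '8', '9'],
      (c == '.') = false → c ∈ (['0', '1', '2', '3', '4', '5', '6', '7', '8', '9'] : List Char) := by
    intro c hc hne
    fin_cases hc
    · simp at hne
    all_goals decide
  have hcs : ∀ x ∈ ns, x ≤ 9 := by
    intro x hx
    rw [hns] at hx
    simp only [List.mem_append, List.mem_map, List.mem_filter] at hx
    have hout : ∃ c, (c ∈ (['0','1','2','3','4','5','6','7','8','9'] : List Char)) ∧ f c = x := by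
      rcases hx with ⟨c, ⟨h, hne⟩, rfl⟩ | ⟨c, ⟨h, hne⟩, rfl⟩ | ⟨c, ⟨h, hne⟩, rfl⟩ | ⟨c, ⟨h, hne⟩, rfl⟩
      · exact ⟨c, hD c (hchars t0 (by simp [List.take_succ_cons]) c h) (by simpa using hne), rfl⟩
      · exact ⟨c, hD c (hchars t1 (by simp [List.take_succ_cons]) c h) (by simpa using hne), rfl⟩
      · exact ⟨c, hD c (hchars t2 (by simp [List.take_succ_cons]) c h) (by simpa using hne), rfl⟩
      · exact ⟨c, hD c (hchars t3 (by simp [List.take_succ_cons]) c h) (by simpa using hne), rfl⟩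
    obtain ⟨c, hc, rfl⟩ := hout
    fin_cases hc <;> decide
  have hsort : s.Pairwise (· ≤ ·) := by
    have := PySem.List.sorted_pairwise ns (fun x => x)
    simpa [hs] using this
  have hbd : ∀ x ∈ s, x ≤ 9 := by
    intro x hx
    exact hcs x ((PySem.List.mem_sorted ns (fun x => x) false x).mp (by rw [← hs]; exact hx))
  have hcnt : ∀ a : Int, ns.count a = s.count a :=
    fun a => ((PySem.List.sorted_perm ns (fun x => x) false).count_eq a).symm
  -- B side: the run scan computes the distinct-digit score of s
  rw [pvMain (2 * number) s.length s le_rfl hsort hbd 0]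
  -- A side: the 0/1-sum over the digit range is a countP
  rw [PySem.List.foldl_add]
  rw [show (fun num => if 0 < ((ns.count num : Int)) ∧ (ns.count num : Int) ≤ 2 * number then (1:Int) else 0)
        = (fun num => if (fun a => decide (0 < ((ns.count a : Int)) ∧ (ns.count a : Int) ≤ 2 * number)) num = true
            then (1:Int) else 0) from by funext num; simp]
  rw [PySem.List.sum_map_ite_one_zero]
  congr 1
  have hrange : PySem.List.pyRange 1 10 1 = [1, 2, 3, 4, 5, 6, 7, 8, 9] := by decide
  rw [hrange]
  unfold pvC
  congr 1
  apply List.countP_congr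
  intro a _
  simp [hcnt a]
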